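-- pv_equiv track=rewrite | github.com/TimbloA/Telem-Web-App | backend/api.py | label_bare_error_markers
-- ===== SOURCE A (Python) =====
-- from typing import Dict, List, Optional, Tuple
--
-- def _header_signature(row: List[str]) -> set:
--     return {str(c).strip() for c in row if c is not None and str(c).strip() != ""}
--
-- def label_bare_error_markers(rows: List[List[str]]) -> List[List[str]]:
--     """
--     If there is a bare '#ERROR!' line with no section name, infer it from the next header row.
--     (This is a bonus safety net; your main issue is '=====' markers.)
--     """
--     out = [list(r) for r in rows]
--
--     def next_nonempty_row(start_idx: int) -> Optional[int]:
--         j = start_idx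
--         while j < len(out):
--             if out[j] and any(str(c).strip() for c in out[j]):
--                 return j
--             j += 1
--         return None
--
--     i = 0
--     while i < len(out):
--         row = out[i]
--         if not row:
--             i += 1
--             continue
--
--         first = (row[0] or "").strip()
--
--         if first == "#ERROR!" and (len(row) < 2 or (row[1] or "").strip() == ""):
--             j = next_nonempty_row(i + 1)
--             if j is None:
--                 i += 1
--                 continue
--
--             sig = _header_signature(out[j])
--
--             if {"Serial #", "Session", "Filename", "Start Time"}.issubset(sig):
--                 out[i] = ["#ERROR!", "File Info"]
--             elif {"Lat", "Lon", "UTC", "PeachTime"}.issubset(sig):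
--                 out[i] = ["#ERROR!", "GPS Info"]
--             elif {"Position", "Name", "Abbr", "Weight"}.issubset(sig):
--                 out[i] = ["#ERROR!", "Crew Info"]
--             elif {"Start", "End", "#", "Duration", "Distance", "Rating", "Pace", "comment", "Wind", "Stream", "Validated"}.issubset(sig):
--                 out[i] = ["#ERROR!", "Piece"]
--             elif any("Aperiodic" in str(c) for c in out[j]) and any("0x800A" in str(c) for c in out[j]):
--                 out[i] = ["#ERROR!", "Aperiodic", "0x800A"]
--             elif any("Periodic" in str(c) for c in out[j]):
--                 out[i] = ["#ERROR!", "Periodic"]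
--
--         i += 1
--
--     return out
-- ===== SOURCE B (Python) =====
-- from typing import List, Optional
--
-- _SIGS = [
--     ({"Serial #", "Session", "Filename", "Start Time"}, ["#ERROR!", "File Info"]),
--     ({"Lat", "Lon", "UTC", "PeachTime"}, ["#ERROR!", "GPS Info"]),
--     ({"Position", "Name", "Abbr", "Weight"}, ["#ERROR!", "Crew Info"]),
--     ({"Start", "End", "#", "Duration", "Distance", "Rating", "Pace", "comment",
--       "Wind", "Stream", "Validated"}, ["#ERROR!", "Piece"]),
-- ]
--
-- def _classify(row: List[str]) -> Optional[List[str]]: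
--     """Label a header row, or None if it matches no known section header."""
--     sig = {str(c).strip() for c in row if c is not None and str(c).strip() != ""}
--     for needed, label in _SIGS:
--         if needed <= sig:
--             return list(label)
--     if any("Aperiodic" in str(c) for c in row) and any("0x800A" in str(c) for c in row):
--         return ["#ERROR!", "Aperiodic", "0x800A"]
--     if any("Periodic" in str(c) for c in row):
--         return ["#ERROR!", "Periodic"]
--     return None
--
-- def _is_bare_error(row: List[str]) -> bool:
--     return bool(row) and (row[0] or "").strip() == "#ERROR!" and \
--         (len(row) < 2 or (row[1] or "").strip() == "")
--
-- def label_bare_error_markers(rows: List[List[str]]) -> List[List[str]]: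
--     out = []
--     pending = None  # label inferred from the nearest non-empty row below
--     for row in reversed(rows):
--         if _is_bare_error(row) and pending is not None:
--             out.append(pending)
--         else:
--             out.append(list(row))
--         if row and any(str(c).strip() for c in row):
--             pending = _classify(row)
--     out.reverse()
--     return out
-- ===== Notes on version B (the rewrite author's own statement) =====
-- stated objective: alternative
-- what changed: Replaced A's forward index loop that rescans ahead for the next non-empty row at every bare '#ERROR!' marker by a single reverse pass that carries the label inferred from the nearest non-empty row below; it trades A's worst-case quadratic rescans for classifying every non-empty row once.
import Mathlib
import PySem

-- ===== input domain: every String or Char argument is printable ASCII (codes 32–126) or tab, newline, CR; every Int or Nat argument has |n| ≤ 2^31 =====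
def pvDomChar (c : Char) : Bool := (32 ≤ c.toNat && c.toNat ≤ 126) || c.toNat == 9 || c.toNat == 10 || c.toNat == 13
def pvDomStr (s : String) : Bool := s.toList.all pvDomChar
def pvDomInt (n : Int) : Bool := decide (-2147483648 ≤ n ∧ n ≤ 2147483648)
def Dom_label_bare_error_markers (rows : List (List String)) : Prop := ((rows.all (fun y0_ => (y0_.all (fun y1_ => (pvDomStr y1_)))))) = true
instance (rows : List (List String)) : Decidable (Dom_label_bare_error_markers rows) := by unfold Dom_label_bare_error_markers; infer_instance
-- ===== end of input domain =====

-- B replaces A's per-marker forward rescan for the next non-empty row by one reverse pass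
-- carrying the label inferred from the nearest non-empty row below (alternative algorithm).

-- ===== PORT A =====
-- next_nonempty_row(start_idx)
def pvNextNonempty (out : List (List String)) (j : Nat) : Option Nat :=
  if h : j < out.length then
    if out[j] ≠ [] ∧ (out[j].any fun c => PySem.Str.strip c ≠ "") then some j
    else pvNextNonempty out (j + 1)
  else none
termination_by out.length - j

-- the main while loop over i, mutating out in place (out.set i …)
def pvLoopA (out : List (List String)) (i : Nat) : List (List String) :=
  if h : i < out.length then
    let row := out[i]
    if row = [] then pvLoopA out (i + 1)
    else
      let first := PySem.Str.strip (row.headD "")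
      if first = "#ERROR!" ∧ (row.length < 2 ∨ PySem.Str.strip (row.getD 1 "") = "") then
        match pvNextNonempty out (i + 1) with
        | none => pvLoopA out (i + 1)
        | some j =>
          let target := out.getD j []
          -- _header_signature(out[j])
          let sig := PySem.Set.ofList ((target.map PySem.Str.strip).filter (fun s => s ≠ ""))
          let newRow :=
            if PySem.Set.issubset (PySem.Set.ofList ["Serial #", "Session", "Filename", "Start Time"]) sig then
              ["#ERROR!", "File Info"]
            else if PySem.Set.issubset (PySem.Set.ofList ["Lat", "Lon", "UTC", "PeachTime"]) sig then
              ["#ERROR!", "GPS Info"]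
            else if PySem.Set.issubset (PySem.Set.ofList ["Position", "Name", "Abbr", "Weight"]) sig then
              ["#ERROR!", "Crew Info"]
            else if PySem.Set.issubset (PySem.Set.ofList ["Start", "End", "#", "Duration", "Distance", "Rating", "Pace", "comment", "Wind", "Stream", "Validated"]) sig then
              ["#ERROR!", "Piece"]
            else if (target.any fun c => PySem.Str.isIn "Aperiodic" c) ∧ (target.any fun c => PySem.Str.isIn "0x800A" c) then
              ["#ERROR!", "Aperiodic", "0x800A"]
            else if target.any fun c => PySem.Str.isIn "Periodic" c then
              ["#ERROR!", "Periodic"]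
            else row   -- no branch fires: out[i] stays unchanged
          pvLoopA (out.set i newRow) (i + 1)
      else pvLoopA out (i + 1)
  else out
termination_by out.length - i
decreasing_by all_goals (try simp only [List.length_set]); omega

def label_bare_error_markers (rows : List (List String)) : List (List String) :=
  -- out = [list(r) for r in rows] is a fresh copy; copying is the identity here
  pvLoopA rows 0

-- ===== PORT B =====
-- the known header signatures with their labels (_SIGS)
def pvSigs : List (PySem.Set String × List String) :=
  [ (PySem.Set.ofList ["Serial #", "Session", "Filename", "Start Time"], ["#ERROR!", "File Info"]),
    (PySem.Set.ofList ["Lat", "Lon", "UTC", "PeachTime"], ["#ERROR!", "GPS Info"]),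
    (PySem.Set.ofList ["Position", "Name", "Abbr", "Weight"], ["#ERROR!", "Crew Info"]),
    (PySem.Set.ofList ["Start", "End", "#", "Duration", "Distance", "Rating", "Pace", "comment", "Wind", "Stream", "Validated"], ["#ERROR!", "Piece"]) ]

-- the 'for needed, label in _SIGS: if needed <= sig: return list(label)' loop
def pvFirstSig : List (PySem.Set String × List String) → PySem.Set String → Option (List String)
  | [], _ => none
  | (needed, label) :: rest, sig =>
    if PySem.Set.issubset needed sig then some label else pvFirstSig rest sig

-- _classify(row)
def pvClassify (row : List String) : Option (List String) :=
  let sig := PySem.Set.ofList ((row.map PySem.Str.strip).filter (fun s => s ≠ ""))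
  match pvFirstSig pvSigs sig with
  | some label => some label
  | none =>
    if (row.any fun c => PySem.Str.isIn "Aperiodic" c) ∧ (row.any fun c => PySem.Str.isIn "0x800A" c) then
      some ["#ERROR!", "Aperiodic", "0x800A"]
    else if row.any fun c => PySem.Str.isIn "Periodic" c then
      some ["#ERROR!", "Periodic"]
    else none

-- _is_bare_error(row)
def pvIsBare (row : List String) : Bool :=
  decide (row ≠ [] ∧ PySem.Str.strip (row.headD "") = "#ERROR!" ∧
          (row.length < 2 ∨ PySem.Str.strip (row.getD 1 "") = ""))

-- one iteration of the reversed loop: emit the output row, update pending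
def pvStepB (row : List String) (acc : List (List String) × Option (List String)) :
    List (List String) × Option (List String) :=
  let newRow :=
    if pvIsBare row then (match acc.2 with | some p => p | none => row) else row
  let pending :=
    if row ≠ [] ∧ (row.any fun c => PySem.Str.strip c ≠ "") then pvClassify row else acc.2
  (newRow :: acc.1, pending)

def label_bare_error_markers_alt (rows : List (List String)) : List (List String) :=
  (rows.foldr pvStepB ([], none)).1

-- ===== PRECONDITION & SPEC =====
def Spec_label_bare_error_markers (rows : List (List String)) (out : List (List String)) : Prop := out = label_bare_error_markers_alt rows
instance (rows : List (List String)) (out : List (List String)) : Decidable (Spec_label_bare_error_markers rows out) := by unfold Spec_label_bare_error_markers; infer_instance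

-- ===== CLAIM (what is proved, stated in full; the proofs are below) =====
def Claim_equal_label_bare_error_markers : Prop := ∀ (rows : List (List String)), Dom_label_bare_error_markers rows → Spec_label_bare_error_markers rows (label_bare_error_markers rows)

-- ===== LEMMAS AND PROOFS =====

-- the label carried by B's reverse pass: classification of the first non-empty row of the suffix
def pvFindLabel : List (List String) → Option (List String)
  | [] => none
  | r :: rs =>
    if r ≠ [] ∧ (r.any fun c => PySem.Str.strip c ≠ "") then pvClassify r else pvFindLabel rs

-- the common per-suffix specification of both programs
def pvG : List (List String) → List (List String)
  | [] => []
  | r :: rs =>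
    (if pvIsBare r then (match pvFindLabel rs with | some p => p | none => r) else r) :: pvG rs

lemma foldr_pair (s : List (List String)) :
    s.foldr pvStepB ([], none) = (pvG s, pvFindLabel s) := by
  induction s with
  | nil => rfl
  | cons r rs ih => simp only [List.foldr_cons, ih, pvStepB, pvG, pvFindLabel]

lemma alt_eq_pvG (rows : List (List String)) :
    label_bare_error_markers_alt rows = pvG rows := by
  simp only [label_bare_error_markers_alt, foldr_pair]

lemma findLabel_eq_bind (out : List (List String)) (j : Nat) :
    pvFindLabel (out.drop j) = (pvNextNonempty out j).bind (fun k => pvClassify (out.getD k [])) := by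
  by_cases h : j < out.length
  · rw [List.drop_eq_getElem_cons h, pvNextNonempty, dif_pos h]
    by_cases hn : out[j] ≠ [] ∧ (out[j].any fun c => PySem.Str.strip c ≠ "")
    · rw [pvFindLabel, if_pos hn, if_pos hn, Option.bind_some,
          List.getD_eq_getElem?_getD, List.getElem?_eq_getElem h, Option.getD_some]
    · rw [pvFindLabel, if_neg hn, if_neg hn]
      exact findLabel_eq_bind out (j + 1)
  · rw [pvNextNonempty, dif_neg h, List.drop_eq_nil_of_le (Nat.le_of_not_lt h)]
    rfl
termination_by out.length - j
decreasing_by omega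

-- A's inline if/elif chain with fallback `row` equals pvClassify's Option with default `row`
lemma chain_eq (sig : PySem.Set String) (target row : List String)
    (hsig : sig = PySem.Set.ofList ((target.map PySem.Str.strip).filter (fun s => s ≠ ""))) :
    (if PySem.Set.issubset (PySem.Set.ofList ["Serial #", "Session", "Filename", "Start Time"]) sig then
       ["#ERROR!", "File Info"]
     else if PySem.Set.issubset (PySem.Set.ofList ["Lat", "Lon", "UTC", "PeachTime"]) sig then
       ["#ERROR!", "GPS Info"]
     else if PySem.Set.issubset (PySem.Set.ofList ["Position", "Name", "Abbr", "Weight"]) sig then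
       ["#ERROR!", "Crew Info"]
     else if PySem.Set.issubset (PySem.Set.ofList ["Start", "End", "#", "Duration", "Distance", "Rating", "Pace", "comment", "Wind", "Stream", "Validated"]) sig then
       ["#ERROR!", "Piece"]
     else if (target.any fun c => PySem.Str.isIn "Aperiodic" c) ∧ (target.any fun c => PySem.Str.isIn "0x800A" c) then
       ["#ERROR!", "Aperiodic", "0x800A"]
     else if target.any fun c => PySem.Str.isIn "Periodic" c then
       ["#ERROR!", "Periodic"]
     else row) = (pvClassify target).getD row := by
  subst hsig
  simp only [pvClassify, pvSigs, pvFirstSig]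
  split_ifs <;> rfl

lemma loopA_eq (n : Nat) (out : List (List String)) (i : Nat) (hn : out.length - i ≤ n) :
    pvLoopA out i = out.take i ++ pvG (out.drop i) := by
  induction n generalizing out i with
  | zero =>
    have h : ¬ i < out.length := by omega
    rw [pvLoopA, dif_neg h, List.drop_eq_nil_of_le (Nat.le_of_not_lt h),
        List.take_of_length_le (Nat.le_of_not_lt h)]
    simp [pvG]
  | succ n ih =>
    by_cases h : i < out.length
    · have hdrop : out.drop i = out[i] :: out.drop (i + 1) := List.drop_eq_getElem_cons h
      have htake : out.take (i + 1) = out.take i ++ [out[i]] := by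
        rw [List.take_add_one, List.getElem?_eq_getElem h]; rfl
      rw [pvLoopA]
      simp only [h, dite_true]
      by_cases hrow : out[i] = []
      · have hbare : pvIsBare out[i] = false := decide_eq_false (fun hh => hh.1 hrow)
        rw [if_pos hrow, ih out (i + 1) (by omega), hdrop, pvG, hbare,
            if_neg Bool.false_ne_true, htake, List.append_assoc, List.singleton_append]
      · rw [if_neg hrow]
        by_cases hc : PySem.Str.strip (out[i].headD "") = "#ERROR!" ∧
            (out[i].length < 2 ∨ PySem.Str.strip (out[i].getD 1 "") = "")
        · have hbare : pvIsBare out[i] = true := decide_eq_true ⟨hrow, hc⟩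
          rw [if_pos hc]
          have hfl := findLabel_eq_bind out (i + 1)
          cases hnext : pvNextNonempty out (i + 1) with
          | none =>
            rw [hnext] at hfl
            have hfl' : pvFindLabel (out.drop (i + 1)) = none := hfl
            rw [ih out (i + 1) (by omega), hdrop, pvG, hbare, if_pos rfl, hfl',
                htake, List.append_assoc, List.singleton_append]
          | some j =>
            rw [hnext] at hfl
            have hfl' : pvFindLabel (out.drop (i + 1)) = pvClassify (out.getD j []) := hfl
            have hset_take : ∀ v : List String, (out.set i v).take (i + 1) = out.take i ++ [v] := by
              intro v
              rw [List.take_add_one]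
              simp [List.take_set, h,
                    List.set_eq_of_length_le (by simp : (out.take i).length ≤ i)]
            simp only [chain_eq _ (out.getD j []) out[i] rfl]
            rw [ih _ (i + 1) (by simp only [List.length_set]; omega),
                List.drop_set_of_lt (by omega : i < i + 1),
                hset_take, hdrop, pvG, hbare, if_pos rfl, hfl']
            cases pvClassify (out.getD j []) <;>
              simp only [Option.getD_some, Option.getD_none, List.append_assoc,
                         List.singleton_append]
        · have hbare : pvIsBare out[i] = false :=
            decide_eq_false (fun hh => hc ⟨hh.2.1, hh.2.2⟩)
          rw [if_neg hc, ih out (i + 1) (by omega), hdrop, pvG, hbare,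
              if_neg Bool.false_ne_true, htake, List.append_assoc, List.singleton_append]
    · rw [pvLoopA, dif_neg h, List.drop_eq_nil_of_le (Nat.le_of_not_lt h),
          List.take_of_length_le (Nat.le_of_not_lt h)]
      simp [pvG]

-- ===== VERDICT (by name: the statement is the Claim_ definition above) =====
theorem label_bare_error_markers_spec : Claim_equal_label_bare_error_markers := by
  intro rows _
  unfold Spec_label_bare_error_markers label_bare_error_markers
  rw [loopA_eq rows.length rows 0 (by omega), alt_eq_pvG]
  rfl
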